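-- pv_equiv track=rewrite | github.com/Elie-A/Bioinformatics | Rosalind-BioInformaticsStronghold/36-k-Mer Composition/KMerComposition.py | kmer_composition
-- ===== SOURCE A (Python) =====
-- from itertools import product
--
-- def generate_kmers(k):
--     return [''.join(kmer) for kmer in product('ACGT', repeat=k)]
--
-- def kmer_composition(s, k):
--     kmers = generate_kmers(k)
--     kmer_count = {kmer: 0 for kmer in kmers}
--
--     for i in range(len(s) - k + 1):
--         kmer = s[i:i+k]
--         if kmer in kmer_count:
--             kmer_count[kmer] += 1
--
--     return [kmer_count[kmer] for kmer in kmers]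
-- ===== SOURCE B (Python) =====
-- def kmer_composition(s, k):
--     code = {'A': 0, 'C': 1, 'G': 2, 'T': 3}
--     cnt = {}
--     for i in range(len(s) - k + 1):
--         idx = 0
--         for ch in s[i:i+k]:
--             d = code.get(ch)
--             if d is None:
--                 break
--             idx = idx * 4 + d
--         else:
--             cnt[idx] = cnt.get(idx, 0) + 1
--     return [cnt.get(j, 0) for j in range(4 ** k)]
-- ===== Notes on version B (the rewrite author's own statement) =====
-- stated objective: alternative
-- what changed: Instead of generating all 4^k k-mer strings and counting windows in a string-keyed dict, B encodes each window as a base-4 integer (A=0,C=1,G=2,T=3), counts these codes in an int-keyed dict, and reads the result back over range(4**k), whose numeric order is exactly A's lexicographic k-mer order.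
-- outside the precondition, e.g. on kmer_composition('A', -1): A raises ValueError, B raises TypeError
import Mathlib
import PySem

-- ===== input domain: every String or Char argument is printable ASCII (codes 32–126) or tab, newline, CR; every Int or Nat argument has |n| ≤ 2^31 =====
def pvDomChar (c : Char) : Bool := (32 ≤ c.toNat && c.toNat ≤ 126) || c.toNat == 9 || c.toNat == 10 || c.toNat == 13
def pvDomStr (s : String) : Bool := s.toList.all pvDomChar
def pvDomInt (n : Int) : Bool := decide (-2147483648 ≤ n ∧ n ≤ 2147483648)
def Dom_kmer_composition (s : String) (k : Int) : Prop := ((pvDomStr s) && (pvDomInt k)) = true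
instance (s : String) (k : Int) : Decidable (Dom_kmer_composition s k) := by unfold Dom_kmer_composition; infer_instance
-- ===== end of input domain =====

-- B never generates the 4^k k-mer strings: it encodes each window as a base-4 integer
-- (A=0,C=1,G=2,T=3), counts codes in an int-keyed dict, and reads the counts back in
-- numeric = lexicographic order (objective: alternative data structure).

-- ===== PORT A =====
-- itertools.product('ACGT', repeat=k), joined: first coordinate varies slowest
def pvProdACGT : Nat → List (List Char)
  | 0 => [[]]
  | n + 1 => ("ACGT".toList).flatMap (fun c => (pvProdACGT n).map (fun r => c :: r))

def generate_kmers (k : Int) : List (List Char) := pvProdACGT k.toNat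

def kmer_composition (s : String) (k : Int) : List Int :=
  let kmers := generate_kmers k
  let kmer_count : PySem.Dict (List Char) Int :=
    kmers.foldl (fun d km => d.insert km 0) PySem.Dict.empty
  let n : Int := s.toList.length
  let d :=
    (PySem.List.pyRange 0 (n - k + 1) 1).foldl (fun d i =>
      let kmer := PySem.List.slice s.toList (some i) (some (i + k))
      if d.contains kmer then d.modify kmer 0 (· + 1) else d) kmer_count
  kmers.map (fun km => d.getD km 0)

-- ===== PORT B =====
-- code.get(ch) on the literal digit dict {'A':0,'C':1,'G':2,'T':3}
def pvDigit? (c : Char) : Option Nat :=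
  (PySem.Dict.mk [('A', 0), ('C', 1), ('G', 2), ('T', 3)]).get? c

-- the inner for/else loop of B: accumulate idx = idx*4 + d, None on a non-ACGT char
def pvEnc : Nat → List Char → Option Nat
  | acc, [] => some acc
  | acc, c :: cs =>
    match pvDigit? c with
    | none => none
    | some d => pvEnc (acc * 4 + d) cs

def kmer_composition_alt (s : String) (k : Int) : List Int :=
  let n : Int := s.toList.length
  let cnt : PySem.Dict Nat Int :=
    (PySem.List.pyRange 0 (n - k + 1) 1).foldl (fun d i =>
      match pvEnc 0 (PySem.List.slice s.toList (some i) (some (i + k))) with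
      | none => d
      | some idx => d.insert idx (d.getD idx 0 + 1)) PySem.Dict.empty
  (List.range (4 ^ k.toNat)).map (fun j => cnt.getD j 0)

-- ===== PRECONDITION & SPEC =====
-- Pre_ excludes k < 0, where A raises ValueError (product(repeat=k)) and B raises TypeError.
def Pre_kmer_composition (s : String) (k : Int) : Prop := 0 ≤ k
instance (s : String) (k : Int) : Decidable (Pre_kmer_composition s k) := by unfold Pre_kmer_composition; infer_instance

def pvWitness_kmer_composition : String × Int := ("ACGTAC", 2)

def Spec_kmer_composition (s : String) (k : Int) (out : List Int) : Prop := out = kmer_composition_alt s k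
instance (s : String) (k : Int) (out : List Int) : Decidable (Spec_kmer_composition s k out) := by unfold Spec_kmer_composition; infer_instance

-- ===== CLAIM (what is proved, stated in full; the proofs are below) =====
def Claim_equal_kmer_composition : Prop := ∀ (s : String) (k : Int), Dom_kmer_composition s k → Pre_kmer_composition s k → Spec_kmer_composition s k (kmer_composition s k)

-- ===== LEMMAS AND PROOFS =====

-- decoding: the j-th (0-based, lexicographic) k-mer over ACGT
def pvDigitChar (d : Nat) : Char :=
  if d = 0 then 'A' else if d = 1 then 'C' else if d = 2 then 'G' else 'T'

def pvDec : Nat → Nat → List Char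
  | 0, _ => []
  | n + 1, j => pvDigitChar (j / 4 ^ n) :: pvDec n (j % 4 ^ n)

theorem range_mul (a b : Nat) :
    List.range (a * b) = (List.range a).flatMap (fun d => (List.range b).map (fun r => d * b + r)) := by
  induction a with
  | zero => simp
  | succ a ih =>
    rw [Nat.succ_mul, List.range_add, List.range_succ, List.flatMap_append, ← ih]
    simp [Nat.add_comm]

theorem prod_eq_map_dec (k : Nat) :
    pvProdACGT k = (List.range (4 ^ k)).map (pvDec k) := by
  induction k with
  | zero => simp [pvProdACGT, pvDec]
  | succ k ih =>
    have h4 : ("ACGT".toList) = (List.range 4).map pvDigitChar := by decide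
    rw [pvProdACGT, ih, h4, pow_succ, Nat.mul_comm, List.flatMap_map, range_mul,
      List.map_flatMap]
    refine List.flatMap_congr (fun d hd => ?_)
    rw [List.map_map, List.map_map]
    refine List.map_congr_left (fun r hr => ?_)
    simp only [List.mem_range] at hd hr
    simp only [Function.comp]
    have hb : 0 < 4 ^ k := by positivity
    have h1 : (d * 4 ^ k + r) / 4 ^ k = d := by
      rw [Nat.add_comm, Nat.add_mul_div_right _ _ hb, Nat.div_eq_of_lt hr, Nat.zero_add]
    have h2 : (d * 4 ^ k + r) % 4 ^ k = r := by
      rw [Nat.add_comm, Nat.add_mul_mod_self_right, Nat.mod_eq_of_lt hr]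
    rw [pvDec, h1, h2]

theorem pvDigit?_eq_some (c : Char) (d : Nat) : pvDigit? c = some d ↔
    (c = 'A' ∧ d = 0) ∨ (c = 'C' ∧ d = 1) ∨ (c = 'G' ∧ d = 2) ∨ (c = 'T' ∧ d = 3) := by
  by_cases hA : c = 'A'
  · subst hA; simp [pvDigit?, PySem.Dict.get?_mk_cons, eq_comm]
  · by_cases hC : c = 'C'
    · subst hC; simp [pvDigit?, PySem.Dict.get?_mk_cons, eq_comm]
    · by_cases hG : c = 'G'
      · subst hG; simp [pvDigit?, PySem.Dict.get?_mk_cons, eq_comm]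
      · by_cases hT : c = 'T'
        · subst hT; simp [pvDigit?, PySem.Dict.get?_mk_cons, eq_comm]
        · simp [pvDigit?, PySem.Dict.get?, hA, hC, hG, hT, Ne.symm]

theorem pvDigit?_digitChar (d : Nat) (h : d < 4) : pvDigit? (pvDigitChar d) = some d := by
  interval_cases d <;> decide

theorem enc_spec (w : List Char) : ∀ (acc j : Nat),
    pvEnc acc w = some j ↔ ∃ r, r < 4 ^ w.length ∧ j = acc * 4 ^ w.length + r ∧ w = pvDec w.length r := by
  induction w with
  | nil =>
    intro acc j
    simp only [pvEnc, List.length_nil, pow_zero, Option.some_inj]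
    constructor
    · rintro rfl; exact ⟨0, by omega, by omega, rfl⟩
    · rintro ⟨r, hr, hj, -⟩; omega
  | cons c cs ih =>
    intro acc j
    have key : ∀ (a d r' : Nat), (a * 4 + d) * 4 ^ cs.length + r'
        = a * 4 ^ (cs.length + 1) + (d * 4 ^ cs.length + r') := by
      intro a d r'; rw [pow_succ]; ring
    have hb : 0 < 4 ^ cs.length := by positivity
    simp only [pvEnc, List.length_cons]
    cases hdig : pvDigit? c with
    | none =>
      simp only [reduceCtorEq, false_iff]
      rintro ⟨r, hr, hj, hw⟩
      rw [pvDec] at hw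
      have hlt : r / 4 ^ cs.length < 4 := (Nat.div_lt_iff_lt_mul hb).2 (by rw [← pow_succ']; exact hr)
      obtain ⟨hch, -⟩ := List.cons_eq_cons.mp hw
      have := pvDigit?_digitChar _ hlt
      rw [← hch, hdig] at this
      cases this
    | some d =>
      obtain ⟨hc, hd4⟩ : c = pvDigitChar d ∧ d < 4 := by
        rcases (pvDigit?_eq_some c d).1 hdig with ⟨rfl, rfl⟩ | ⟨rfl, rfl⟩ | ⟨rfl, rfl⟩ | ⟨rfl, rfl⟩ <;>
          exact ⟨by decide, by decide⟩
      rw [ih]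
      constructor
      · rintro ⟨r', hr', rfl, hcs⟩
        refine ⟨d * 4 ^ cs.length + r', ?_, key .., ?_⟩
        · calc d * 4 ^ cs.length + r' < (d + 1) * 4 ^ cs.length := by nlinarith
            _ ≤ 4 ^ (cs.length + 1) := by rw [pow_succ, Nat.mul_comm (4 ^ cs.length) 4]; exact Nat.mul_le_mul_right _ (by omega)
        · rw [pvDec]
          have h1 : (d * 4 ^ cs.length + r') / 4 ^ cs.length = d := by
            rw [Nat.add_comm, Nat.add_mul_div_right _ _ hb, Nat.div_eq_of_lt hr', Nat.zero_add]
          have h2 : (d * 4 ^ cs.length + r') % 4 ^ cs.length = r' := by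
            rw [Nat.add_comm, Nat.add_mul_mod_self_right, Nat.mod_eq_of_lt hr']
          rw [h1, h2, ← hc, ← hcs]
      · rintro ⟨r, hr, rfl, hw⟩
        rw [pvDec] at hw
        obtain ⟨hch, hcs⟩ := List.cons_eq_cons.mp hw
        have hdr : r / 4 ^ cs.length = d := by
          have hlt : r / 4 ^ cs.length < 4 := (Nat.div_lt_iff_lt_mul hb).2 (by rw [← pow_succ']; exact hr)
          have := pvDigit?_digitChar _ hlt
          rw [← hch, hdig] at this
          exact (Option.some_inj.1 this).symm
        refine ⟨r % 4 ^ cs.length, Nat.mod_lt _ hb, ?_, hcs⟩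
        rw [key]
        congr 1
        rw [← hdr, Nat.mul_comm]; exact (Nat.div_add_mod r (4 ^ cs.length)).symm

theorem loopA (ws : List (List Char)) :
    ∀ (d : PySem.Dict (List Char) Int) (v : List Char),
    (ws.foldl (fun d w => if d.contains w then d.modify w 0 (· + 1) else d) d).getD v 0
      = d.getD v 0 + if d.contains v then (ws.count v : Int) else 0 := by
  induction ws with
  | nil => intro d v; simp
  | cons w ws ih =>
    intro d v
    simp only [List.foldl_cons]
    by_cases hw : d.contains w
    · rw [if_pos hw]
      rw [ih]
      rw [PySem.Dict.getD_modify]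
      have hcv : (d.modify w 0 (· + 1)).contains v = d.contains v := by
        rw [PySem.Dict.contains_modify]
        by_cases hvw : v = w
        · subst hvw; simp [hw]
        · simp [hvw]
      rw [hcv]
      by_cases hvw : v = w
      · subst hvw
        simp [hw, List.count_cons_self]
        ring
      · rw [if_neg hvw, List.count_cons_of_ne (Ne.symm hvw)]
    · rw [if_neg hw]
      rw [ih]
      by_cases hcv : d.contains v
      · have hvw : v ≠ w := fun h => hw (h ▸ hcv)
        rw [List.count_cons_of_ne (Ne.symm hvw)]
      · simp [hcv]

theorem getD_init (kmers : List (List Char)) :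
    ∀ (d : PySem.Dict (List Char) Int), (∀ v, d.getD v 0 = 0) →
    ∀ v, (kmers.foldl (fun d km => d.insert km 0) d).getD v 0 = 0 := by
  induction kmers with
  | nil => intro d h v; exact h v
  | cons km kmers ih =>
    intro d h v
    simp only [List.foldl_cons]
    refine ih _ (fun u => ?_) v
    rw [PySem.Dict.getD_insert]
    split_ifs with h1
    · rfl
    · exact h u

theorem loopB (ws : List (List Char)) :
    ∀ (d : PySem.Dict Nat Int) (j : Nat),
    (ws.foldl (fun d w =>
        match pvEnc 0 w with
        | none => d
        | some idx => d.insert idx (d.getD idx 0 + 1)) d).getD j 0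
      = d.getD j 0 + (ws.countP (fun w => pvEnc 0 w == some j) : Int) := by
  induction ws with
  | nil => intro d j; simp
  | cons w ws ih =>
    intro d j
    simp only [List.foldl_cons]
    cases henc : pvEnc 0 w with
    | none =>
      rw [ih, List.countP_cons_of_neg (by simp [henc])]
    | some idx =>
      rw [ih, PySem.Dict.getD_insert]
      by_cases hji : j = idx
      · subst hji
        rw [if_pos rfl, List.countP_cons_of_pos (by simp [henc])]
        push_cast; ring
      · rw [if_neg hji, List.countP_cons_of_neg (by simp [henc, Ne.symm hji])]

theorem kmer_composition_spec : Claim_equal_kmer_composition := by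
  intro s k _ hk
  show kmer_composition s k = kmer_composition_alt s k
  have hK : (k.toNat : Int) = k := Int.toNat_of_nonneg hk
  set K := k.toNat with hKdef
  set L := s.toList with hL
  set n : Int := (L.length : Int) with hn
  set ws : List (List Char) :=
    (PySem.List.pyRange 0 (n - k + 1) 1).map
      (fun i => PySem.List.slice L (some i) (some (i + k))) with hws
  -- every window has length K
  have hlen : ∀ w ∈ ws, w.length = K := by
    intro w hw
    rw [hws] at hw
    obtain ⟨i, hi, rfl⟩ := List.mem_map.mp hw
    rw [PySem.List.mem_pyRange_one] at hi
    obtain ⟨hi0, hi1⟩ := hi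
    rw [PySem.List.slice_toNat L hi0 (by omega), List.length_take, List.length_drop]
    omega
  -- both ports, zeta-reduced and with the pyRange fold turned into a fold over the windows
  have hAdef : kmer_composition s k
      = (pvProdACGT K).map (fun km =>
          (ws.foldl (fun d w => if d.contains w then d.modify w 0 (· + 1) else d)
            ((pvProdACGT K).foldl (fun d km => d.insert km 0) (PySem.Dict.empty : PySem.Dict (List Char) Int))).getD km 0) := by
    show (pvProdACGT K).map _ = _
    congr 1
    rw [hws, List.foldl_map]
    rfl
  have hBdef : kmer_composition_alt s k
      = (List.range (4 ^ K)).map (fun j =>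
          (ws.foldl (fun d w =>
            match pvEnc 0 w with
            | none => d
            | some idx => d.insert idx (d.getD idx 0 + 1))
            (PySem.Dict.empty : PySem.Dict Nat Int)).getD j 0) := by
    show (List.range (4 ^ K)).map _ = _
    congr 1
    rw [hws, List.foldl_map]
  rw [hAdef, hBdef]
  -- initial dict: value 0 everywhere, keys = the kmer list
  have hd0 : ∀ v, ((pvProdACGT K).foldl (fun d km => d.insert km 0) (PySem.Dict.empty : PySem.Dict (List Char) Int)).getD v 0 = 0 :=
    getD_init (pvProdACGT K) (PySem.Dict.empty : PySem.Dict (List Char) Int) (fun v => PySem.Dict.getD_empty v 0)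
  have hcont : ∀ v, ((pvProdACGT K).foldl (fun d km => d.insert km 0) (PySem.Dict.empty : PySem.Dict (List Char) Int)).contains v = true ↔ v ∈ pvProdACGT K := by
    intro v
    rw [PySem.Dict.contains_iff_mem_keys, PySem.Dict.keys_foldl_insert, PySem.Dict.keys_empty]
    change v ∈ PySem.Set.update PySem.Set.empty (pvProdACGT K) ↔ _
    rw [PySem.Set.update_empty, PySem.Set.mem_ofList]
  have hAmap :
      (pvProdACGT K).map (fun km =>
        (ws.foldl (fun d w => if d.contains w then d.modify w 0 (· + 1) else d)
          ((pvProdACGT K).foldl (fun d km => d.insert km 0) (PySem.Dict.empty : PySem.Dict (List Char) Int))).getD km 0)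
      = (pvProdACGT K).map (fun km => (ws.count km : Int)) := by
    refine List.map_congr_left (fun km hkm => ?_)
    rw [loopA, hd0, if_pos ((hcont km).mpr hkm), zero_add]
  rw [hAmap, prod_eq_map_dec, List.map_map]
  refine List.map_congr_left (fun j hj => ?_)
  rw [List.mem_range] at hj
  simp only [Function.comp]
  rw [loopB, PySem.Dict.getD_empty, zero_add]
  congr 1
  rw [List.count_eq_countP]
  refine List.countP_congr (fun w hw => ?_)
  have hwlen := hlen w hw
  have hiff : pvEnc 0 w = some j ↔ w = pvDec K j := by
    rw [enc_spec, hwlen]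
    constructor
    · rintro ⟨r, hr, hjr, hwr⟩
      have : r = j := by omega
      subst this
      exact hwr
    · rintro rfl
      exact ⟨j, hj, by omega, rfl⟩
  simp only [beq_iff_eq]
  exact hiff.symm
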